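-- pv_equiv track=rewrite | github.com/maliiin/DAT600-assignments | Assignment_2/coin_change.py | compare_greedy_dynamic
-- ===== SOURCE A (Python) =====
-- import copy
--
-- def greedy_coin_change(c, N):
--     c.sort(reverse=True)
--     selected_coins = []
--     for coin in c:
--         while coin <= N:
--             selected_coins.append(coin)
--             N -= coin
--         if N == 0:
--             break
--     return selected_coins
--
-- def dynamic_coin_change(c, N):
--     # make solution for all subproblems <=N
--     subproblems = []
--     for n in range(1, N + 1):
--         # amount of coins in best solution
--         best_amount = float("inf")
--         # actual coins to get best solution
--         best_coins = []
--
--         for coin in c: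
--             # check if coin is a possible solution
--             if coin <= n:
--                 remainder = n - coin
--                 if remainder > 0:
--                     # add coin to a solution for a subproblem that is already solve
--                     this_solution = copy.deepcopy(subproblems[remainder - 1])
--                     this_solution.append(coin)
--                 else:
--                     this_solution = [coin]
--                 # check if this solution is best
--                 if len(this_solution) < best_amount:
--                     best_coins = this_solution
--                     best_amount = len(this_solution)
--         subproblems.append(best_coins)
--
--     return subproblems[N - 1]
--
-- def compare_greedy_dynamic(c, n):
--     similarity_count = 0
--     for i in range(1, n + 1):
--         greedy = greedy_coin_change(c, i)
--         dynamic = dynamic_coin_change(c, i)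
--         greedy.sort()
--         dynamic.sort()
--         if dynamic == greedy:
--             similarity_count += 1
--     return similarity_count
-- ===== SOURCE B (Python) =====
-- def compare_greedy_dynamic(c, n):
--     # NOTE: like A, this sorts c in place (descending); equivalence is about the return value.
--     c.sort(reverse=True)
--     # One DP table up to n, built once (A rebuilds it from scratch for every amount i).
--     table = []
--     for k in range(1, n + 1):
--         best = None
--         for coin in c:
--             if coin <= k:
--                 sol = (table[k - coin - 1] + [coin]) if k > coin else [coin]
--                 if best is None or len(sol) < len(best):
--                     best = sol
--         table.append(best if best is not None else [])
--     count = 0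
--     for i in range(1, n + 1):
--         # greedy by division instead of repeated subtraction
--         rem = i
--         g = []
--         for coin in c:
--             q, rem = divmod(rem, coin)
--             g.extend([coin] * q)
--         if sorted(g) == sorted(table[i - 1]):
--             count += 1
--     return count
-- ===== Notes on version B (the rewrite author's own statement) =====
-- stated objective: faster
-- what changed: B builds the DP table once up to n and reuses its rows for every amount (A rebuilds the whole table with deepcopy for each i), and computes each greedy solution by integer division instead of repeated subtraction.
import Mathlib
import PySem

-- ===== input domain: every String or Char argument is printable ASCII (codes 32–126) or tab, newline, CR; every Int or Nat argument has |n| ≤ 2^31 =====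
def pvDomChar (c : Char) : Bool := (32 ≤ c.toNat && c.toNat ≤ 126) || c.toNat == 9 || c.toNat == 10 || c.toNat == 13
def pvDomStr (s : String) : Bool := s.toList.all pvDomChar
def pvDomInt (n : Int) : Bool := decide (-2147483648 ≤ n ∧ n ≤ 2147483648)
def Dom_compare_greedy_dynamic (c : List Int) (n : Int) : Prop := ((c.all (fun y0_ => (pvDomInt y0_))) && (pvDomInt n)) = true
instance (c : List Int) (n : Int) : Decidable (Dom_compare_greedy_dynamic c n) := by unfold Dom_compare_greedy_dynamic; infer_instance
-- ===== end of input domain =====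

-- B builds one DP table up to n (A rebuilds it per amount with deepcopy) and computes greedy by
-- division instead of repeated subtraction (an asymptotically smaller amount of work). Like A, Python B sorts c in place
-- (desc); the equivalence proved here is about the return value only.


-- ===== PORT A =====
-- the 'while coin <= N' loop; fuel N.toNat+1 suffices whenever the Python loop terminates (coin ≥ 1)
def pvWhileSub (coin : Int) : Nat → Int → List Int → Int × List Int
  | 0, N, sel => (N, sel)
  | fuel+1, N, sel => if coin ≤ N then pvWhileSub coin fuel (N - coin) (sel ++ [coin]) else (N, sel)

-- 'for coin in c: … ; if N == 0: break'
def pvGreedyLoop : List Int → Int → List Int → List Int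
  | [], _, sel => sel
  | coin :: rest, N, sel =>
      let r := pvWhileSub coin (N.toNat + 1) N sel
      if r.1 = 0 then r.2 else pvGreedyLoop rest r.1 r.2

def greedy_coin_change (c : List Int) (N : Int) : List Int :=
  pvGreedyLoop (PySem.List.sorted c (fun x => x) true) N []

-- inner 'for coin in c' of dynamic_coin_change; state = (best_amount (none = inf), best_coins)
def pvDynStep (subs : List (List Int)) (nn : Int) (st : Option Nat × List Int) (coin : Int) :
    Option Nat × List Int :=
  if coin ≤ nn then
    let remainder := nn - coin
    let this_solution :=
      if remainder > 0 then ((PySem.List.pyGet? subs (remainder - 1)).getD []) ++ [coin]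
      else [coin]
    match st.1 with
    | none => (some this_solution.length, this_solution)
    | some b => if this_solution.length < b then (some this_solution.length, this_solution) else st
  else st

def dynamic_coin_change (c : List Int) (N : Int) : List Int :=
  let subproblems := (PySem.List.pyRange 1 (N+1) 1).foldl
    (fun subs nn => subs ++ [(c.foldl (pvDynStep subs nn) (none, [])).2]) []
  (PySem.List.pyGet? subproblems (N - 1)).getD []

def compare_greedy_dynamic (c : List Int) (n : Int) : Int :=
  -- Python's first greedy call sorts c in place (descending), so every dynamic call sees the
  -- sorted list; the port passes that list to dynamic explicitly.
  let cs := PySem.List.sorted c (fun x => x) true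
  (PySem.List.pyRange 1 (n+1) 1).foldl (fun cnt i =>
    let greedy := greedy_coin_change c i
    let dynamic := dynamic_coin_change cs i
    if PySem.List.sorted dynamic (fun x => x) false = PySem.List.sorted greedy (fun x => x) false
    then cnt + 1 else cnt) 0

-- ===== PORT B =====
-- inner 'for coin in c' of the one-shot table build; state = best : Option (List Int)
def pvRowStep (table : List (List Int)) (k : Int) (best : Option (List Int)) (coin : Int) :
    Option (List Int) :=
  if coin ≤ k then
    let sol :=
      if k > coin then ((PySem.List.pyGet? table (k - coin - 1)).getD []) ++ [coin]
      else [coin]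
    match best with
    | none => some sol
    | some b => if sol.length < b.length then some sol else best
  else best

def pvBuildTable (cs : List Int) (n : Int) : List (List Int) :=
  (PySem.List.pyRange 1 (n+1) 1).foldl
    (fun table k => table ++ [(cs.foldl (pvRowStep table k) none).getD []]) []

-- 'q, rem = divmod(rem, coin); g.extend([coin] * q)'
def pvDivStep (st : Int × List Int) (coin : Int) : Int × List Int :=
  let qr := (PySem.Int.divmod? st.1 coin).getD (0, st.1)
  (qr.2, st.2 ++ List.replicate qr.1.toNat coin)

def compare_greedy_dynamic_alt (c : List Int) (n : Int) : Int :=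
  let cs := PySem.List.sorted c (fun x => x) true
  let table := pvBuildTable cs n
  (PySem.List.pyRange 1 (n+1) 1).foldl (fun cnt i =>
    if PySem.List.sorted (cs.foldl pvDivStep (i, [])).2 (fun x => x) false
       = PySem.List.sorted ((PySem.List.pyGet? table (i-1)).getD []) (fun x => x) false
    then cnt + 1 else cnt) 0

-- ===== PRECONDITION & SPEC =====
-- Pre_ excludes only inputs on which A never returns: with n ≥ 1 and a coin ≤ 0 the greedy
-- while-loop runs forever (or dynamic raises IndexError); A returns on everything Pre_ admits.
def Pre_compare_greedy_dynamic (c : List Int) (n : Int) : Prop :=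
  n ≤ 0 ∨ ∀ x ∈ c, 0 < x
instance (c : List Int) (n : Int) : Decidable (Pre_compare_greedy_dynamic c n) := by
  unfold Pre_compare_greedy_dynamic; infer_instance

def pvWitness_compare_greedy_dynamic : List Int × Int := ([4, 1], 6)

def Spec_compare_greedy_dynamic (c : List Int) (n : Int) (out : Int) : Prop := out = compare_greedy_dynamic_alt c n
instance (c : List Int) (n : Int) (out : Int) : Decidable (Spec_compare_greedy_dynamic c n out) := by unfold Spec_compare_greedy_dynamic; infer_instance

-- ===== CLAIM (what is proved, stated in full; the proofs are below) =====
def Claim_equal_compare_greedy_dynamic : Prop := ∀ (c : List Int) (n : Int), Dom_compare_greedy_dynamic c n → Pre_compare_greedy_dynamic c n → Spec_compare_greedy_dynamic c n (compare_greedy_dynamic c n)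

-- ===== LEMMAS AND PROOFS =====

-- divmod? unfolded for a nonzero divisor
theorem pvDivmod_eq {a b : Int} (hb : b ≠ 0) :
    PySem.Int.divmod? a b = some (PySem.Int.floordiv a b, PySem.Int.mod a b) := by
  simp [PySem.Int.divmod?, PySem.Int.floordiv, PySem.Int.mod, hb]

-- the while-loop of A's greedy is division with remainder
theorem pvWhileSub_spec (coin : Int) (hc : 1 ≤ coin) :
    ∀ (fuel : Nat) (N : Int) (sel : List Int), 0 ≤ N → N.toNat < fuel →
    pvWhileSub coin fuel N sel =
      (PySem.Int.mod N coin,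
       sel ++ List.replicate (PySem.Int.floordiv N coin).toNat coin) := by
  intro fuel
  induction fuel with
  | zero => intro N sel h0 hf; omega
  | succ f ih =>
    intro N sel h0 hf
    have hc0 : (0:Int) < coin := by omega
    rw [pvWhileSub]
    by_cases h : coin ≤ N
    · rw [if_pos h]
      rw [ih (N - coin) (sel ++ [coin]) (by omega) (by omega)]
      have hmod : PySem.Int.mod (N - coin) coin = PySem.Int.mod N coin := by
        rw [PySem.Int.mod_eq_emod_of_pos hc0, PySem.Int.mod_eq_emod_of_pos hc0]
        exact Int.sub_emod_right N coin
      have hdiv : PySem.Int.floordiv N coin = PySem.Int.floordiv (N - coin) coin + 1 := by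
        rw [PySem.Int.floordiv_eq_ediv_of_pos hc0, PySem.Int.floordiv_eq_ediv_of_pos hc0]
        have h2 : N - coin = N + (-1) * coin := by ring
        rw [h2, Int.add_mul_ediv_right N (-1) (by omega : coin ≠ 0)]
        ring
      have hq : 0 ≤ PySem.Int.floordiv (N - coin) coin := by
        rw [PySem.Int.floordiv_eq_ediv_of_pos hc0]
        exact Int.ediv_nonneg (by omega) (by omega)
      have ht : (PySem.Int.floordiv (N - coin) coin + 1).toNat
          = (PySem.Int.floordiv (N - coin) coin).toNat + 1 := by omega
      rw [hmod, hdiv, ht, List.replicate_succ, List.append_assoc]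
      rfl
    · rw [if_neg h]
      have hm : PySem.Int.mod N coin = N := by
        rw [PySem.Int.mod_eq_emod_of_pos hc0]
        exact Int.emod_eq_of_lt h0 (by omega)
      have hd : PySem.Int.floordiv N coin = 0 := by
        rw [PySem.Int.floordiv_eq_ediv_of_pos hc0]
        exact Int.ediv_eq_zero_of_lt h0 (by omega)
      rw [hm, hd]
      simp

-- B's division fold does nothing once the remainder is 0
theorem pvDivFold_zero (cs : List Int) (hpos : ∀ x ∈ cs, 0 < x) :
    ∀ sel : List Int, cs.foldl pvDivStep (0, sel) = (0, sel) := by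
  induction cs with
  | nil => intro sel; rfl
  | cons coin rest ih =>
    intro sel
    have hc : 0 < coin := hpos coin (by simp)
    have hrest : ∀ x ∈ rest, 0 < x := fun x hx => hpos x (List.mem_cons_of_mem _ hx)
    have hstep : pvDivStep (0, sel) coin = (0, sel) := by
      have h0d : PySem.Int.floordiv 0 coin = 0 := by
        rw [PySem.Int.floordiv_eq_ediv_of_pos hc]; simp
      have h0m : PySem.Int.mod 0 coin = 0 := by
        rw [PySem.Int.mod_eq_emod_of_pos hc]; simp
      simp [pvDivStep, pvDivmod_eq (by omega : coin ≠ 0), h0d, h0m]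
    rw [List.foldl_cons, hstep]
    exact ih hrest sel

-- A's greedy loop equals B's division fold (positive coins, nonneg amount)
theorem pvGreedy_eq_div (cs : List Int) (hpos : ∀ x ∈ cs, 0 < x) :
    ∀ (N : Int) (sel : List Int), 0 ≤ N →
    pvGreedyLoop cs N sel = (cs.foldl pvDivStep (N, sel)).2 := by
  induction cs with
  | nil => intro N sel _; rfl
  | cons coin rest ih =>
    intro N sel hN
    have hc : 0 < coin := hpos coin (by simp)
    have hrest : ∀ x ∈ rest, 0 < x := fun x hx => hpos x (List.mem_cons_of_mem _ hx)
    have hw := pvWhileSub_spec coin (by omega) (N.toNat + 1) N sel hN (by omega)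
    have hstep : pvDivStep (N, sel) coin =
        (PySem.Int.mod N coin, sel ++ List.replicate (PySem.Int.floordiv N coin).toNat coin) := by
      simp [pvDivStep, pvDivmod_eq (by omega : coin ≠ 0)]
    rw [pvGreedyLoop, List.foldl_cons, hstep]
    simp only [hw]
    by_cases hr : PySem.Int.mod N coin = 0
    · rw [if_pos hr, hr]
      rw [pvDivFold_zero rest hrest]
    · rw [if_neg hr]
      exact ih hrest (PySem.Int.mod N coin) _ (PySem.Int.mod_nonneg N hc)

-- A's inner row fold is the image of B's under (Option.map length, Option.getD [])
theorem pvRow_rel (cs : List Int) (subs : List (List Int)) (k : Int) :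
    ∀ b : Option (List Int),
    cs.foldl (pvDynStep subs k) (b.map List.length, b.getD []) =
      ((cs.foldl (pvRowStep subs k) b).map List.length,
       (cs.foldl (pvRowStep subs k) b).getD []) := by
  induction cs with
  | nil => intro b; rfl
  | cons coin rest ih =>
    intro b
    rw [List.foldl_cons, List.foldl_cons]
    have hstep : pvDynStep subs k (b.map List.length, b.getD []) coin =
        ((pvRowStep subs k b coin).map List.length, (pvRowStep subs k b coin).getD []) := by
      have hcond : (k - coin > 0) = (k > coin) := propext (by omega)
      cases b with
      | none =>
        simp only [pvDynStep, pvRowStep, Option.map_none, Option.getD_none]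
        simp only [hcond]
        split_ifs <;> rfl
      | some bl =>
        simp only [pvDynStep, pvRowStep, Option.map_some, Option.getD_some]
        simp only [hcond]
        split_ifs <;> rfl
    rw [hstep]
    exact ih (pvRowStep subs k b coin)

-- A's per-amount table equals B's table
theorem pvSubs_eq_table (cs : List Int) (m : Int) :
    (PySem.List.pyRange 1 (m+1) 1).foldl
      (fun subs nn => subs ++ [(cs.foldl (pvDynStep subs nn) (none, [])).2]) [] =
    pvBuildTable cs m := by
  unfold pvBuildTable
  apply PySem.List.foldl_congr_mem
  intro acc x _
  have h := pvRow_rel cs acc x none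
  simp only [Option.map_none, Option.getD_none] at h
  rw [h]

-- one build step of B's table
theorem pvBuildTable_succ (cs : List Int) (m : Int) (h : 0 ≤ m) :
    pvBuildTable cs (m+1) =
      pvBuildTable cs m ++ [(cs.foldl (pvRowStep (pvBuildTable cs m) (m+1)) none).getD []] := by
  unfold pvBuildTable
  rw [PySem.List.pyRange_one_succ_right (by omega : (1:Int) ≤ m+1), List.foldl_append]
  rfl

theorem pvFoldl_append_length {alpha beta : Type} (g : List alpha → beta → alpha) :
    ∀ (l : List beta) (t : List alpha),
    (l.foldl (fun t k => t ++ [g t k]) t).length = t.length + l.length := by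
  intro l
  induction l with
  | nil => intro t; simp
  | cons x xs ih =>
    intro t
    rw [List.foldl_cons, ih]
    simp
    omega

theorem pvBuildTable_length (cs : List Int) (m : Int) :
    (pvBuildTable cs m).length = (m : Int).toNat := by
  unfold pvBuildTable
  rw [pvFoldl_append_length (fun t k => (cs.foldl (pvRowStep t k) none).getD [])]
  rw [PySem.List.length_pyRange_one]
  simp

theorem pvBuildTable_prefix (cs : List Int) (i m : Int) (h1 : 1 ≤ i) (h2 : i ≤ m) :
    ∃ s, pvBuildTable cs m = pvBuildTable cs i ++ s := by
  refine Int.le_induction ?_ ?_ m h2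
  · exact ⟨[], by simp⟩
  · rintro n hn ⟨s, hs⟩
    refine ⟨s ++ [(cs.foldl (pvRowStep (pvBuildTable cs n) (n+1)) none).getD []], ?_⟩
    rw [pvBuildTable_succ cs n (by omega), hs, List.append_assoc]

theorem pvDynamic_eq_table (cs : List Int) (i n : Int) (h1 : 1 ≤ i) (h2 : i ≤ n) :
    dynamic_coin_change cs i = (PySem.List.pyGet? (pvBuildTable cs n) (i-1)).getD [] := by
  show (PySem.List.pyGet?
      ((PySem.List.pyRange 1 (i+1) 1).foldl
        (fun subs nn => subs ++ [(cs.foldl (pvDynStep subs nn) (none, [])).2]) [])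
      (i - 1)).getD [] = _
  rw [pvSubs_eq_table]
  obtain ⟨s, hs⟩ := pvBuildTable_prefix cs i n h1 h2
  have hnn : (0:Int) ≤ i - 1 := by omega
  rw [hs, PySem.List.pyGet?_of_nonneg _ hnn, PySem.List.pyGet?_of_nonneg _ hnn]
  rw [List.getElem?_append_left]
  rw [pvBuildTable_length]
  omega

-- ===== VERDICT (by name: the statement is the Claim_ definition above) =====
theorem compare_greedy_dynamic_spec : Claim_equal_compare_greedy_dynamic := by
  intro c n _ hpre
  unfold Spec_compare_greedy_dynamic
  simp only [compare_greedy_dynamic, compare_greedy_dynamic_alt]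
  by_cases hn : n ≤ 0
  · rw [PySem.List.pyRange_one_eq_nil (by omega : n + 1 ≤ 1)]
    rfl
  · have hposc : ∀ x ∈ c, 0 < x := by
      rcases hpre with h | h
      · omega
      · exact h
    have hposcs : ∀ x ∈ PySem.List.sorted c (fun x => x) true, 0 < x := fun x hx =>
      hposc x ((PySem.List.mem_sorted c (fun x => x) true x).mp hx)
    apply PySem.List.foldl_congr_mem
    intro acc i hi
    rw [PySem.List.mem_pyRange_one] at hi
    have hg : greedy_coin_change c i =
        ((PySem.List.sorted c (fun x => x) true).foldl pvDivStep (i, [])).2 := by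
      unfold greedy_coin_change
      exact pvGreedy_eq_div _ hposcs i [] (by omega)
    have hd : dynamic_coin_change (PySem.List.sorted c (fun x => x) true) i =
        (PySem.List.pyGet? (pvBuildTable (PySem.List.sorted c (fun x => x) true) n) (i-1)).getD [] :=
      pvDynamic_eq_table _ i n (by omega) (by omega)
    rw [hg, hd]
    by_cases he : PySem.List.sorted
        ((PySem.List.pyGet? (pvBuildTable (PySem.List.sorted c (fun x => x) true) n) (i-1)).getD [])
        (fun x => x) false =
        PySem.List.sorted ((PySem.List.sorted c (fun x => x) true).foldl pvDivStep (i, [])).2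
        (fun x => x) false
    · rw [if_pos he, if_pos he.symm]
    · rw [if_neg he, if_neg (fun hh => he hh.symm)]
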